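-- pv_equiv track=rewrite | github.com/yossy6028/social-exam-analyzer | modules/year_detector.py | _is_year_range
-- ===== SOURCE A (Python) =====
-- from typing import List, Dict, Tuple, Optional
--
-- def _is_year_range(years: List[str]) -> bool:
--     """複数年度が連続する年度範囲かどうかを判定"""
--     if len(years) <= 1:
--         return False
--
--     try:
--         year_nums = sorted([int(year) for year in years])
--
--         # 連続する年度かチェック（最大3年度まで）
--         if len(year_nums) <= 3:
--             # 全て最近の年度（2020年以降）の場合のみ年度範囲として扱う
--             all_recent = all(year_num >= 2020 for year_num in year_nums)
--
--             if all_recent: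
--                 for i in range(len(year_nums) - 1):
--                     if year_nums[i + 1] - year_nums[i] != 1:
--                         return False
--                 return True
--
--     except ValueError:
--         pass
--
--     return False
-- ===== SOURCE B (Python) =====
-- def _is_year_range(years):
--     """複数年度が連続する年度範囲かどうかを判定"""
--     if not 2 <= len(years) <= 3:
--         return False
--     try:
--         nums = [int(y) for y in years]
--     except ValueError:
--         return False
--     return min(nums) >= 2020 and len(set(nums)) == len(nums) \
--         and max(nums) - min(nums) == len(nums) - 1
-- ===== Notes on version B (the rewrite author's own statement) =====
-- stated objective: simpler
-- what changed: Replaces the sort plus adjacent-difference loop with a closed-form test: min >= 2020, no duplicates (set size), and max - min == n - 1.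
import Mathlib
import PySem

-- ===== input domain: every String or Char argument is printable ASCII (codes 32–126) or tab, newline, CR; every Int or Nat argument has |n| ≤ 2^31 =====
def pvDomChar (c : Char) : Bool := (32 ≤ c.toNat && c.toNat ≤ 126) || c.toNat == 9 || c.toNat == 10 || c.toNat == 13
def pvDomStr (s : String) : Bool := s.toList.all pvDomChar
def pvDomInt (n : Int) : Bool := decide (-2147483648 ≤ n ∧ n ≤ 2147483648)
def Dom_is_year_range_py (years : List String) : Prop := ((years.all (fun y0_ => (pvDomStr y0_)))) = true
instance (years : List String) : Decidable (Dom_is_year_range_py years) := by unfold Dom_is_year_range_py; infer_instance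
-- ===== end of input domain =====

set_option maxHeartbeats 1000000


-- B changes A's sort + adjacent-difference loop into a closed-form test (min/max span and set size); objective: simpler.

-- ===== PORT A =====
-- [int(year) for year in years]: none = some element raises ValueError
def pvParseA : List String → Option (List Int)
  | [] => some []
  | s :: t =>
    match PySem.Int.ofStr? s, pvParseA t with
    | some n, some r => some (n :: r)
    | _, _ => none

def is_year_range_py (years : List String) : Bool :=
  if years.length ≤ 1 then false
  else
    match pvParseA years with
    | none => false  -- ValueError caught: falls through to return False
    | some ns =>
      let year_nums := PySem.List.sorted ns (fun x => x) false
      if year_nums.length ≤ 3 then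
        let all_recent := year_nums.all (fun y => decide (2020 ≤ y))
        if all_recent then
          -- for i in range(len(year_nums) - 1): early return False on a gap, else True
          (List.range (year_nums.length - 1)).all
            (fun i => year_nums.getD (i + 1) 0 - year_nums.getD i 0 == 1)
        else false
      else false

-- ===== PORT B =====
def pvParseB : List String → Option (List Int)
  | [] => some []
  | s :: t =>
    match PySem.Int.ofStr? s, pvParseB t with
    | some n, some r => some (n :: r)
    | _, _ => none

def is_year_range_py_alt (years : List String) : Bool :=
  if 2 ≤ years.length ∧ years.length ≤ 3 then
    match pvParseB years with
    | none => false
    | some nums =>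
      match PySem.List.min? nums (fun x => x), PySem.List.max? nums (fun x => x) with
      | some lo, some hi =>
        decide (2020 ≤ lo) && (PySem.Set.len (PySem.Set.ofList nums) == nums.length)
          && (hi - lo == (nums.length : Int) - 1)
      | _, _ => false
  else false

-- ===== PRECONDITION & SPEC =====
def Spec_is_year_range_py (years : List String) (out : Bool) : Prop := out = is_year_range_py_alt years
instance (years : List String) (out : Bool) : Decidable (Spec_is_year_range_py years out) := by unfold Spec_is_year_range_py; infer_instance

-- ===== CLAIM (what is proved, stated in full; the proofs are below) =====
def Claim_equal_is_year_range_py : Prop := ∀ (years : List String), Dom_is_year_range_py years → Spec_is_year_range_py years (is_year_range_py years)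

-- ===== LEMMAS AND PROOFS =====

theorem pvParse_eq : ∀ ys, pvParseA ys = pvParseB ys := by
  intro ys
  induction ys with
  | nil => rfl
  | cons s t ih => simp [pvParseA, pvParseB, ih]

theorem pvParse_length : ∀ ys ns, pvParseA ys = some ns → ns.length = ys.length := by
  intro ys
  induction ys with
  | nil => intro ns h; simp [pvParseA] at h; simp [← h]
  | cons s t ih =>
    intro ns h
    simp only [pvParseA] at h
    cases hp : PySem.Int.ofStr? s with
    | none => rw [hp] at h; simp at h
    | some n =>
      rw [hp] at h
      cases hq : pvParseA t with
      | none => rw [hq] at h; simp at h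
      | some r =>
        rw [hq] at h
        simp at h
        simp [← h, ih r hq]

-- ===== VERDICT (by name: the statement is the Claim_ definition above) =====
theorem is_year_range_py_spec : Claim_equal_is_year_range_py := by
  intro years _
  unfold Spec_is_year_range_py is_year_range_py is_year_range_py_alt
  rw [← pvParse_eq]
  match years with
  | [] => rfl
  | [x] => rfl
  | [x, y] =>
    rcases hx : PySem.Int.ofStr? x with _ | a <;>
      rcases hy : PySem.Int.ofStr? y with _ | b <;>
        simp only [pvParseA, hx, hy] <;> try rfl
    simp [PySem.List.sorted_eq_foldl_insertBy, PySem.List.insertBy, PySem.List.min?_id_cons,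
          PySem.List.max?_id_cons, PySem.Set.ofList, PySem.Set.add, PySem.Set.len,
          PySem.Set.contains]
    split_ifs <;> simp_all [min_def, max_def] <;>
      first
        | rfl
        | omega
        | (rw [Bool.eq_iff_iff]; simp; omega)
  | [x, y, z] =>
    rcases hx : PySem.Int.ofStr? x with _ | a <;>
      rcases hy : PySem.Int.ofStr? y with _ | b <;>
        rcases hz : PySem.Int.ofStr? z with _ | c <;>
          simp only [pvParseA, hx, hy, hz] <;> try rfl
    simp [PySem.List.sorted_eq_foldl_insertBy, PySem.List.insertBy, PySem.List.min?_id_cons,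
          PySem.List.max?_id_cons, PySem.Set.ofList, PySem.Set.add, PySem.Set.len,
          PySem.Set.contains]
    split_ifs <;> simp_all [PySem.List.insertBy, min_def, max_def] <;>
      first
        | rfl
        | omega
        | (rw [Bool.eq_iff_iff]; simp; omega)
        | ((try (obtain h' | h' := ‹_ ∨ _›; subst h')) <;> (try split_ifs) <;>
            first
              | omega
              | (rw [Bool.eq_iff_iff]; simp [List.range_succ]; omega)
              | (intros; first
                  | (exact ⟨0, by (try simp only [List.length_cons, List.length_nil]); omega, by
                      simp only [List.getElem?_cons_zero, List.getElem?_cons_succ,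
                        Option.getD_some]; omega⟩)
                  | (exact ⟨1, by (try simp only [List.length_cons, List.length_nil]); omega, by
                      simp only [List.getElem?_cons_zero, List.getElem?_cons_succ,
                        Option.getD_some]; omega⟩)))
  | x :: y :: z :: w :: t =>
    cases hp : pvParseA (x :: y :: z :: w :: t) with
    | none => simp
    | some ns =>
      have hl := pvParse_length _ _ hp
      simp only [List.length_cons] at hl
      have h5 : ¬ (ns.length ≤ 3) := by omega
      have h6 : ¬ (t.length + 1 + 1 + 1 < 3) := by omega
      simp [h5, h6]
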